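-- pv_equiv track=rewrite | github.com/cfe-lab/MiCall | micall/utils/exact_coverage.py | build_kmer_index_for_size
-- ===== SOURCE A (Python) =====
-- from collections import defaultdict
-- from typing import Dict, Sequence, Tuple, TextIO, Iterator, cast
--
-- def build_kmer_index_for_size(
--     contigs: Dict[str, str], k: int
-- ) -> Dict[str, Sequence[Tuple[str, int]]]:
--     """
--     Build a k-mer index for a specific k-mer size.
--     Used for lazy computation when encountering reads shorter than the default kmer_size.
--
--     :param contigs: Dictionary mapping contig_name -> sequence
--     :param k: Size of k-mers to index
--     :return: Dictionary mapping kmer -> list of (contig_name, position) tuples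
--     """
--     kmer_index = defaultdict(list)
--
--     for contig_name, sequence in contigs.items():
--         seq_len = len(sequence)
--         for i in range(seq_len - k + 1):
--             kmer = sequence[i : i + k]
--             if "N" not in kmer:  # Skip k-mers with N
--                 kmer_index[kmer].append((contig_name, i))
--
--     ret = cast(Dict[str, Sequence[Tuple[str, int]]], kmer_index)
--     return ret
-- ===== SOURCE B (Python) =====
-- def build_kmer_index_for_size(contigs, k):
--     """Segment each sequence into maximal 'N'-free runs, then slide a k-window
--     over each run: no per-window membership test. A negative k indexes nothing."""
--     index = {}
--     if k < 0:
--         return index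
--     for contig_name, sequence in contigs.items():
--         runs = []            # (offset, run): maximal substrings without 'N'
--         start = 0
--         cur = ''
--         for ch in sequence:
--             if ch == 'N':
--                 runs.append((start, cur))
--                 start += len(cur) + 1
--                 cur = ''
--             else:
--                 cur += ch
--         runs.append((start, cur))
--         for off, run in runs:
--             for j in range(len(run) - k + 1):
--                 index.setdefault(run[j:j + k], []).append((contig_name, off + j))
--     return index
-- ===== Notes on version B (the rewrite author's own statement) =====
-- stated objective: alternative
-- what changed: B first segments each sequence into maximal N-free runs in one character scan and then slides the k-window inside each run, so A's per-window 'N in kmer' membership test disappears by construction; for k < 0, B returns {} instead of A's slice-wraparound artefacts.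
-- intended difference: For k < 0 with a non-empty contigs dict, A returns a dict of negative-slice wraparound artefacts (e.g. key '' at phantom positions past the end of the sequence) while B returns {}; a negative k-mer size matches nothing, so the empty index is the intended value. — e.g. on build_kmer_index_for_size([("c", "A")], -1): A returns [("", [("c", 0), ("c", 1), ("c", 2)])], B returns []
import Mathlib
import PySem

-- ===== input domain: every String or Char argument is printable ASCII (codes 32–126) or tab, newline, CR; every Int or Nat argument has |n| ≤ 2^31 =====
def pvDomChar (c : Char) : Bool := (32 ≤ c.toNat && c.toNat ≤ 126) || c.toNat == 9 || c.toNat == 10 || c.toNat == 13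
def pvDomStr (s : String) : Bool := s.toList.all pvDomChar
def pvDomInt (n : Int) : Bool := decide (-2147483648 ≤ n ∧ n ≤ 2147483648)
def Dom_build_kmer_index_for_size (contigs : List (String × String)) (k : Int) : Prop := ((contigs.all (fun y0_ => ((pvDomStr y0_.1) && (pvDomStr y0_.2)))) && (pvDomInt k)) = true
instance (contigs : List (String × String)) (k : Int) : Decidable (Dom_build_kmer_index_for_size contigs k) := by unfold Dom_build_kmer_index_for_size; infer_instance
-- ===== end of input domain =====

-- ===== PORT A =====
-- A: for each contig, for every window position test 'N' membership and append to a defaultdict.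
def build_kmer_index_for_size (contigs : List (String × String)) (k : Int) : List (String × List (String × Int)) :=
  (contigs.foldl
    (fun (kmer_index : PySem.Dict String (List (String × Int))) nc =>
      let seq_len := PySem.Str.len nc.2
      (PySem.List.pyRange 0 (seq_len - k + 1) 1).foldl
        (fun kmer_index i =>
          let kmer := PySem.Str.slice nc.2 (some i) (some (i + k))
          if ¬ (PySem.Str.isIn "N" kmer = true) then
            kmer_index.modify kmer [] (fun l => l ++ [(nc.1, i)])
          else kmer_index)
        kmer_index)
    PySem.Dict.empty).items

-- ===== PORT B =====
-- B: split each sequence into maximal 'N'-free runs (one char scan), then slide the k-window inside each run.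
def build_kmer_index_for_size_alt (contigs : List (String × String)) (k : Int) : List (String × List (String × Int)) :=
  if k < 0 then (PySem.Dict.empty : PySem.Dict String (List (String × Int))).items else
  (contigs.foldl
    (fun (index : PySem.Dict String (List (String × Int))) nc =>
      let st := nc.2.toList.foldl
        (fun (st : List (Int × List Char) × Int × List Char) ch =>
          if ch = 'N' then
            (st.1 ++ [(st.2.1, st.2.2)], (st.2.1 + PySem.Chars.len st.2.2 + 1, []))
          else
            (st.1, (st.2.1, st.2.2 ++ [ch])))
        ([], (0, []))
      let runs := st.1 ++ [(st.2.1, st.2.2)]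
      runs.foldl
        (fun index orun =>
          (PySem.List.pyRange 0 (PySem.Chars.len orun.2 - k + 1) 1).foldl
            (fun index j =>
              let kmer := String.ofList (PySem.Chars.slice orun.2 (some j) (some (j + k)))
              index.modify kmer [] (fun l => l ++ [(nc.1, orun.1 + j)]))
            index)
        index)
    PySem.Dict.empty).items

-- ===== PRECONDITION & SPEC =====
-- For k < 0 with non-empty contigs, A returns slice-wraparound artefacts (e.g. key "" at phantom
-- positions past the end of the sequence) while B returns the empty index, the intended value.
def D_build_kmer_index_for_size (contigs : List (String × String)) (k : Int) : Prop := k < 0 ∧ contigs ≠ []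
instance (contigs : List (String × String)) (k : Int) : Decidable (D_build_kmer_index_for_size contigs k) := by unfold D_build_kmer_index_for_size; infer_instance
def Spec_build_kmer_index_for_size (contigs : List (String × String)) (k : Int) (out : List (String × List (String × Int))) : Prop := ¬ D_build_kmer_index_for_size contigs k → out = build_kmer_index_for_size_alt contigs k
instance (contigs : List (String × String)) (k : Int) (out : List (String × List (String × Int))) : Decidable (Spec_build_kmer_index_for_size contigs k out) := by unfold Spec_build_kmer_index_for_size; infer_instance
def pvDiffWitness_build_kmer_index_for_size : (List (String × String)) × Int := ([("c", "A")], -1)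
def pvDiffWitnessOut_build_kmer_index_for_size : (List (String × List (String × Int))) × (List (String × List (String × Int))) := ([("", [("c", 0), ("c", 1), ("c", 2)])], [])

-- ===== CLAIM (what is proved, stated in full; the proofs are below) =====
def Claim_unchanged_build_kmer_index_for_size : Prop := ∀ (contigs : List (String × String)) (k : Int), Dom_build_kmer_index_for_size contigs k → Spec_build_kmer_index_for_size contigs k (build_kmer_index_for_size contigs k)
def Claim_changed_build_kmer_index_for_size : Prop := Dom_build_kmer_index_for_size (pvDiffWitness_build_kmer_index_for_size.1) (pvDiffWitness_build_kmer_index_for_size.2) ∧ D_build_kmer_index_for_size (pvDiffWitness_build_kmer_index_for_size.1) (pvDiffWitness_build_kmer_index_for_size.2) ∧ build_kmer_index_for_size (pvDiffWitness_build_kmer_index_for_size.1) (pvDiffWitness_build_kmer_index_for_size.2) = pvDiffWitnessOut_build_kmer_index_for_size.1 ∧ build_kmer_index_for_size_alt (pvDiffWitness_build_kmer_index_for_size.1) (pvDiffWitness_build_kmer_index_for_size.2) = pvDiffWitnessOut_build_kmer_index_for_size.2 ∧ pvDiffWitnessOut_build_kmer_index_for_size.1 ≠ pvDiffWitnessOu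t_build_kmer_index_for_size.2
def Claim_exact_build_kmer_index_for_size : Prop := ∀ (contigs : List (String × String)) (k : Int), Dom_build_kmer_index_for_size contigs k → D_build_kmer_index_for_size contigs k → build_kmer_index_for_size contigs k ≠ build_kmer_index_for_size_alt contigs k

-- ===== LEMMAS AND PROOFS =====

-- dict entry push: d[key].append(val) for a defaultdict(list)
def pvPush (d : PySem.Dict String (List (String × Int))) (e : String × (String × Int)) :
    PySem.Dict String (List (String × Int)) :=
  d.modify e.1 [] (fun l => l ++ [e.2])

-- A's per-contig step, named for the proofs (definitionally the port's lambda)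
def pvStepA (k : Int) (d : PySem.Dict String (List (String × Int))) (nc : String × String) :
    PySem.Dict String (List (String × Int)) :=
  let seq_len := PySem.Str.len nc.2
  (PySem.List.pyRange 0 (seq_len - k + 1) 1).foldl
    (fun kmer_index i =>
      let kmer := PySem.Str.slice nc.2 (some i) (some (i + k))
      if ¬ (PySem.Str.isIn "N" kmer = true) then
        kmer_index.modify kmer [] (fun l => l ++ [(nc.1, i)])
      else kmer_index)
    d

-- B's per-contig step, named for the proofs (definitionally the port's lambda)
def pvStepB (k : Int) (d : PySem.Dict String (List (String × Int))) (nc : String × String) :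
    PySem.Dict String (List (String × Int)) :=
  let st := nc.2.toList.foldl
    (fun (st : List (Int × List Char) × Int × List Char) ch =>
      if ch = 'N' then
        (st.1 ++ [(st.2.1, st.2.2)], (st.2.1 + PySem.Chars.len st.2.2 + 1, []))
      else
        (st.1, (st.2.1, st.2.2 ++ [ch])))
    ([], (0, []))
  let runs := st.1 ++ [(st.2.1, st.2.2)]
  runs.foldl
    (fun index orun =>
      (PySem.List.pyRange 0 (PySem.Chars.len orun.2 - k + 1) 1).foldl
        (fun index j =>
          let kmer := String.ofList (PySem.Chars.slice orun.2 (some j) (some (j + k)))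
          index.modify kmer [] (fun l => l ++ [(nc.1, orun.1 + j)]))
        index)
    d

theorem portA_eq (contigs : List (String × String)) (k : Int) :
    build_kmer_index_for_size contigs k = (contigs.foldl (pvStepA k) PySem.Dict.empty).items := rfl

theorem portB_eq (contigs : List (String × String)) (k : Int) (h : ¬ k < 0) :
    build_kmer_index_for_size_alt contigs k = (contigs.foldl (pvStepB k) PySem.Dict.empty).items := by
  unfold build_kmer_index_for_size_alt
  rw [if_neg h]
  rfl

-- generic fold-shape lemmas
theorem pv_foldl_if_push {α E D : Type} (push : D → E → D) (p : α → Prop) [DecidablePred p]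
    (f : α → E) : ∀ (l : List α) (d : D),
    l.foldl (fun d i => if p i then push d (f i) else d) d
      = (l.filterMap (fun i => if p i then some (f i) else none)).foldl push d := by
  intro l
  induction l with
  | nil => intro d; rfl
  | cons x t ih =>
    intro d
    by_cases hx : p x <;> simp [hx, ih]

theorem pv_foldl_flat {α E D : Type} (push : D → E → D) (g : α → List E) :
    ∀ (l : List α) (d : D),
    l.foldl (fun d x => (g x).foldl push d) d = (l.flatMap g).foldl push d := by
  intro l
  induction l with
  | nil => intro d; rfl
  | cons x t ih => intro d; simp [List.flatMap_cons, List.foldl_append, ih]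

-- entry lists
def pvWin (name : String) (K : Nat) (base : Int) (r : List Char) :
    List (String × (String × Int)) :=
  (List.range (r.length + 1 - K)).map
    (fun j => (String.ofList ((r.drop j).take K), (name, base + (j : Int))))

def pvEA (name : String) (K : Nat) (base : Int) (s : List Char) :
    List (String × (String × Int)) :=
  (List.range (s.length + 1 - K)).filterMap
    (fun i => if 'N' ∈ (s.drop i).take K then none
              else some (String.ofList ((s.drop i).take K), (name, base + (i : Int))))

def pvRuns : List Char → Int → List (Int × List Char)
  | [], off => [(off, [])]
  | c :: rest, off =>
    if c = 'N' then (off, []) :: pvRuns rest (off + 1)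
    else match pvRuns rest (off + 1) with
         | [] => [(off, [c])]
         | (_, p) :: ps => (off, c :: p) :: ps

theorem pvRuns_noN : ∀ (s : List Char) (off : Int), 'N' ∉ s → pvRuns s off = [(off, s)] := by
  intro s
  induction s with
  | nil => intro off _; rfl
  | cons c t ih =>
    intro off h
    have hc : ¬ c = 'N' := fun hc => h (hc ▸ List.mem_cons_self ..)
    have ht : 'N' ∉ t := fun m => h (List.mem_cons_of_mem _ m)
    simp [pvRuns, hc, ih _ ht]

theorem pvRuns_split : ∀ (a : List Char) (b : List Char) (off : Int), 'N' ∉ a →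
    pvRuns (a ++ 'N' :: b) off = (off, a) :: pvRuns b (off + (a.length : Int) + 1) := by
  intro a
  induction a with
  | nil => intro b off _; simp [pvRuns]
  | cons c t ih =>
    intro b off h
    have hc : ¬ c = 'N' := fun hc => h (hc ▸ List.mem_cons_self ..)
    have ht : 'N' ∉ t := fun m => h (List.mem_cons_of_mem _ m)
    have := ih b (off + 1) ht
    simp only [List.cons_append, pvRuns, if_neg hc, this]
    simp only [List.length_cons]
    push_cast
    ring

theorem pvWin_cons (name : String) (K : Nat) (base : Int) (c : Char) (r : List Char) :
    pvWin name K base (c :: r)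
      = (if K ≤ r.length + 1 then [(String.ofList ((c :: r).take K), (name, base))] else [])
        ++ pvWin name K (base + 1) r := by
  by_cases h : K ≤ r.length + 1
  · have h2 : (c :: r).length + 1 - K = (r.length + 1 - K) + 1 := by
      simp only [List.length_cons]; omega
    rw [pvWin, h2, List.range_succ_eq_map, List.map_cons, List.map_map]
    simp only [if_pos h, List.drop_zero, Nat.cast_zero, add_zero, List.singleton_append]
    rw [pvWin]
    congr 1
    apply List.map_congr_left
    intro j _
    simp only [Function.comp_apply, List.drop_succ_cons, Nat.succ_eq_add_one, Nat.cast_add,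
      Nat.cast_one]
    rw [show base + ((j : Int) + 1) = base + 1 + (j : Int) from by ring]
  · have h1 : r.length + 1 + 1 - K = 0 := by omega
    have h2 : r.length + 1 - K = 0 := by omega
    simp [pvWin, h1, h2, h]

theorem pvEA_cons (name : String) (K : Nat) (base : Int) (c : Char) (s : List Char) :
    pvEA name K base (c :: s)
      = (if K ≤ s.length + 1 ∧ 'N' ∉ (c :: s).take K
           then [(String.ofList ((c :: s).take K), (name, base))] else [])
        ++ pvEA name K (base + 1) s := by
  have hshift : (List.range (s.length + 1 - K)).filterMap
        ((fun i => if 'N' ∈ ((c :: s).drop i).take K then none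
              else some (String.ofList (((c :: s).drop i).take K), (name, base + (i : Int)))) ∘ Nat.succ)
      = pvEA name K (base + 1) s := by
    rw [pvEA]
    apply List.filterMap_congr
    intro j _
    simp only [Function.comp_apply, List.drop_succ_cons, Nat.succ_eq_add_one, Nat.cast_add,
      Nat.cast_one]
    rw [show base + ((j : Int) + 1) = base + 1 + (j : Int) from by ring]
  by_cases h : K ≤ s.length + 1
  · have h2 : (c :: s).length + 1 - K = (s.length + 1 - K) + 1 := by
      simp only [List.length_cons]; omega
    rw [pvEA, h2, List.range_succ_eq_map]
    by_cases hm : 'N' ∈ (c :: s).take K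
    · rw [if_neg (fun hq => hq.2 hm), List.nil_append, ← hshift]
      simp [List.filterMap_cons, List.filterMap_map, hm]
    · rw [if_pos ⟨h, hm⟩, ← hshift]
      simp [List.filterMap_cons, List.filterMap_map, hm]
  · have h1 : s.length + 1 + 1 - K = 0 := by omega
    have h2 : s.length + 1 - K = 0 := by omega
    simp [pvEA, h1, h2, h]
theorem pvEA_noN (name : String) (K : Nat) :
    ∀ (s : List Char) (base : Int), 'N' ∉ s → pvEA name K base s = pvWin name K base s := by
  intro s
  induction s with
  | nil =>
    intro base _
    rw [pvEA, pvWin]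
    rcases K with _ | K
    · simp
    · simp
  | cons c t ih =>
    intro base h
    have ht : 'N' ∉ t := fun m => h (List.mem_cons_of_mem _ m)
    have hm : 'N' ∉ (c :: t).take K := fun m => h (List.take_subset _ _ m)
    rw [pvEA_cons, pvWin_cons, ih _ ht]
    by_cases hk : K ≤ t.length + 1
    · rw [if_pos ⟨hk, hm⟩, if_pos hk]
    · rw [if_neg (fun hq => hk hq.1), if_neg hk]

theorem pvEA_split (name : String) (K : Nat) :
    ∀ (a b : List Char) (base : Int), 'N' ∉ a →
    pvEA name K base (a ++ 'N' :: b)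
      = pvWin name K base a ++ pvEA name K (base + (a.length : Int) + 1) b := by
  intro a
  induction a with
  | nil =>
    intro b base _
    rw [List.nil_append, pvEA_cons, pvWin]
    rcases K with _ | K
    · simp
    · have hm : 'N' ∈ ('N' :: b).take (K + 1) := by simp [List.take_succ_cons]
      rw [if_neg (fun hq => hq.2 hm)]
      simp
  | cons c t ih =>
    intro b base h
    have hc : ¬ c = 'N' := fun hc => h (hc ▸ List.mem_cons_self ..)
    have ht : 'N' ∉ t := fun m => h (List.mem_cons_of_mem _ m)
    rw [List.cons_append, pvEA_cons, ih b (base + 1) ht, pvWin_cons]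
    have harith : base + 1 + (t.length : Int) + 1 = base + ((c :: t).length : Int) + 1 := by
      simp only [List.length_cons]; push_cast; ring
    rw [harith]
    have hhead : (if K ≤ (t ++ 'N' :: b).length + 1 ∧ 'N' ∉ List.take K (c :: (t ++ 'N' :: b))
           then [(String.ofList (List.take K (c :: (t ++ 'N' :: b))), (name, base))] else [])
        = (if K ≤ t.length + 1
           then [(String.ofList (List.take K (c :: t)), (name, base))] else []) := by
      have hca : c :: (t ++ 'N' :: b) = (c :: t) ++ 'N' :: b := rfl
      by_cases hk : K ≤ t.length + 1
      · have htake : ((c :: t) ++ 'N' :: b).take K = (c :: t).take K :=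
          List.take_append_of_le_length (by simpa using hk)
        have hnm : 'N' ∉ List.take K (c :: (t ++ 'N' :: b)) := by
          rw [hca, htake]
          exact fun m => h (List.take_subset _ _ m)
        rw [if_pos ⟨by simp only [List.length_append, List.length_cons]; omega, hnm⟩, if_pos hk,
          hca, htake]
      · have hmem : 'N' ∈ List.take K (c :: (t ++ 'N' :: b)) := by
          rw [hca, List.take_append]
          have h1 : (c :: t).take K = c :: t :=
            List.take_of_length_le (by simp only [List.length_cons]; omega)
          rw [h1]
          apply List.mem_append_right
          have h2 : 1 ≤ K - (c :: t).length := by simp only [List.length_cons]; omega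
          rcases Nat.exists_eq_add_of_le h2 with ⟨m, hm⟩
          rw [hm]
          simp [List.take_succ_cons, Nat.add_comm]
        rw [if_neg (fun hq => hq.2 hmem), if_neg hk]
    rw [hhead, List.append_assoc]

theorem pv_decomp : ∀ (s : List Char), 'N' ∈ s → ∃ a b, s = a ++ 'N' :: b ∧ 'N' ∉ a := by
  intro s
  induction s with
  | nil => intro h; cases h
  | cons c t ih =>
    intro h
    by_cases hc : c = 'N'
    · exact ⟨[], t, by rw [hc]; rfl, by simp⟩
    · have ht : 'N' ∈ t := by
        rcases List.mem_cons.mp h with h1 | h1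
        · exact absurd h1.symm hc
        · exact h1
      rcases ih ht with ⟨a, b, hab, hna⟩
      exact ⟨c :: a, b, by rw [hab]; rfl, by
        intro hm
        rcases List.mem_cons.mp hm with h1 | h1
        · exact hc h1.symm
        · exact hna h1⟩

theorem pvEA_eq_flat (name : String) (K : Nat) :
    ∀ (n : Nat) (s : List Char), s.length ≤ n → ∀ (base : Int),
    (pvRuns s base).flatMap (fun orun => pvWin name K orun.1 orun.2) = pvEA name K base s := by
  intro n
  induction n with
  | zero =>
    intro s hs base
    have : s = [] := List.eq_nil_of_length_eq_zero (Nat.le_zero.mp hs)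
    subst this
    rw [pvRuns_noN _ _ (by simp), pvEA_noN _ _ _ _ (by simp)]
    simp
  | succ n ih =>
    intro s hs base
    by_cases h : 'N' ∈ s
    · rcases pv_decomp s h with ⟨a, b, rfl, hna⟩
      have hb : b.length ≤ n := by
        have := hs
        simp only [List.length_append, List.length_cons] at this
        omega
      rw [pvRuns_split a b base hna, List.flatMap_cons, ih b hb, pvEA_split name K a b base hna]
    · rw [pvRuns_noN _ _ h, pvEA_noN _ _ _ _ h]
      simp
theorem pv_singleton_infix (w : List Char) : ['N'] <:+: w ↔ 'N' ∈ w := by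
  constructor
  · intro h
    exact (List.singleton_sublist).mp h.sublist
  · intro h
    rcases List.append_of_mem h with ⟨p, q, rfl⟩
    exact ⟨p, q, by simp⟩

theorem pv_isIn_chars (w : List Char) : (PySem.Chars.isIn ['N'] w = true) ↔ 'N' ∈ w := by
  rw [PySem.Chars.isIn_iff_infix, pv_singleton_infix]

theorem pv_isIn_ofList (w : List Char) :
    (PySem.Str.isIn "N" (String.ofList w) = true) ↔ 'N' ∈ w := by
  have h1 : (String.ofList w).toList = w := by simp
  have h2 : ("N" : String).toList = ['N'] := by decide
  rw [PySem.Str.isIn, h1, h2, pv_isIn_chars]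

theorem pv_slice_window (w : List Char) (j K : Nat) :
    PySem.List.slice w (some (j : Int)) (some ((j : Int) + (K : Int)))
      = (w.drop j).take K := by
  rw [PySem.List.slice_toNat]
  case ha => positivity
  case hb => positivity
  congr 1 <;> first | omega | (congr 1; omega)

-- the run-collecting loop body of B
def pvRunStep (st : List (Int × List Char) × Int × List Char) (ch : Char) :
    List (Int × List Char) × Int × List Char :=
  if ch = 'N' then
    (st.1 ++ [(st.2.1, st.2.2)], (st.2.1 + PySem.Chars.len st.2.2 + 1, []))
  else
    (st.1, (st.2.1, st.2.2 ++ [ch]))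

theorem pv_runsFold : ∀ (s : List Char) (acc : List (Int × List Char)) (start : Int)
    (cur : List Char), 'N' ∉ cur →
    (s.foldl pvRunStep (acc, (start, cur))).1
        ++ [((s.foldl pvRunStep (acc, (start, cur))).2.1,
             (s.foldl pvRunStep (acc, (start, cur))).2.2)]
      = acc ++ pvRuns (cur ++ s) start := by
  intro s
  induction s with
  | nil =>
    intro acc start cur h
    simp only [List.foldl_nil, List.append_nil]
    rw [pvRuns_noN _ _ h]
  | cons c t ih =>
    intro acc start cur h
    by_cases hc : c = 'N'
    · subst hc
      simp only [List.foldl_cons, pvRunStep, if_pos rfl]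
      rw [ih _ _ _ (by simp)]
      rw [pvRuns_split _ _ _ h]
      simp [PySem.Chars.len]
    · simp only [List.foldl_cons, pvRunStep, if_neg hc]
      rw [ih _ _ _ (by
        intro hm
        rcases List.mem_append.mp hm with h1 | h1
        · exact h h1
        · exact hc (List.mem_singleton.mp h1).symm)]
      rw [List.append_assoc]
      rfl

-- A's per-contig entry list, raw form (valid for every k)
def pvRawA (k : Int) (nc : String × String) : List (String × (String × Int)) :=
  (PySem.List.pyRange 0 (PySem.Str.len nc.2 - k + 1) 1).filterMap
    (fun i => if ¬ (PySem.Str.isIn "N" (PySem.Str.slice nc.2 (some i) (some (i + k))) = true)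
              then some (PySem.Str.slice nc.2 (some i) (some (i + k)), (nc.1, i)) else none)

theorem pvStepA_eq (k : Int) (d : PySem.Dict String (List (String × Int))) (nc : String × String) :
    pvStepA k d nc = (pvRawA k nc).foldl pvPush d := by
  unfold pvStepA pvRawA
  exact pv_foldl_if_push pvPush
    (fun i => ¬ (PySem.Str.isIn "N" (PySem.Str.slice nc.2 (some i) (some (i + k))) = true))
    (fun i => (PySem.Str.slice nc.2 (some i) (some (i + k)), (nc.1, i))) _ d

theorem pvRawA_eq (K : Nat) (nc : String × String) :
    pvRawA ((K : Nat) : Int) nc = pvEA nc.1 K 0 nc.2.toList := by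
  unfold pvRawA
  have hlen : PySem.Str.len nc.2 = ((nc.2.toList.length : Nat) : Int) := rfl
  rw [hlen, PySem.List.pyRange_one, List.filterMap_map]
  have hn : (((nc.2.toList.length : Nat) : Int) - (K : Int) + 1 - 0).toNat
      = nc.2.toList.length + 1 - K := by omega
  rw [hn, pvEA]
  apply List.filterMap_congr
  intro j _
  have hsl : PySem.Str.slice nc.2 (some (0 + (j : Int))) (some (0 + (j : Int) + (K : Int)))
      = String.ofList ((nc.2.toList.drop j).take K) := by
    rw [PySem.Str.slice]
    congr 1
    rw [PySem.Chars.slice_eq_listSlice, zero_add, pv_slice_window]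
  rw [Function.comp_apply, hsl]
  by_cases hj : 'N' ∈ (nc.2.toList.drop j).take K
  · rw [if_neg (by simp [pv_isIn_ofList, pv_isIn_chars, hj]), if_pos hj]
  · rw [if_pos (by simp [pv_isIn_ofList, pv_isIn_chars, hj]), if_neg hj, zero_add]

theorem pvWinFold (name : String) (K : Nat) (off : Int) (r : List Char)
    (d : PySem.Dict String (List (String × Int))) :
    (PySem.List.pyRange 0 (PySem.Chars.len r - (K : Int) + 1) 1).foldl
        (fun index j =>
          index.modify (String.ofList (PySem.Chars.slice r (some j) (some (j + (K : Int))))) []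
            (fun l => l ++ [(name, off + j)]))
        d
      = (pvWin name K off r).foldl pvPush d := by
  have hlen : PySem.Chars.len r = ((r.length : Nat) : Int) := rfl
  rw [hlen, PySem.List.pyRange_one]
  have hn : (((r.length : Nat) : Int) - (K : Int) + 1 - 0).toNat = r.length + 1 - K := by omega
  rw [hn, List.foldl_map, pvWin, List.foldl_map]
  apply PySem.List.foldl_congr_mem
  intro acc j _
  have hsl : PySem.Chars.slice r (some ((0 : Int) + (j : Int))) (some ((0 : Int) + (j : Int) + (K : Int)))
      = (r.drop j).take K := by
    rw [PySem.Chars.slice_eq_listSlice, zero_add, pv_slice_window]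
  rw [hsl, zero_add]
  rfl
theorem pvStepB_eq (K : Nat) (d : PySem.Dict String (List (String × Int))) (nc : String × String) :
    pvStepB ((K : Nat) : Int) d nc = (pvEA nc.1 K 0 nc.2.toList).foldl pvPush d := by
  show ((nc.2.toList.foldl pvRunStep ([], (0, []))).1
        ++ [((nc.2.toList.foldl pvRunStep ([], (0, []))).2.1,
             (nc.2.toList.foldl pvRunStep ([], (0, []))).2.2)]).foldl
      (fun index orun =>
        (PySem.List.pyRange 0 (PySem.Chars.len orun.2 - (K : Int) + 1) 1).foldl
          (fun index j =>
            index.modify (String.ofList (PySem.Chars.slice orun.2 (some j) (some (j + (K : Int))))) []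
              (fun l => l ++ [(nc.1, orun.1 + j)]))
          index)
      d = _
  rw [pv_runsFold nc.2.toList [] 0 [] (by simp), List.nil_append, List.nil_append]
  rw [PySem.List.foldl_congr_mem (pvRuns nc.2.toList 0) _
    (fun acc orun => (pvWin nc.1 K orun.1 orun.2).foldl pvPush acc) d
    (fun acc orun _ => pvWinFold nc.1 K orun.1 orun.2 acc)]
  have hflat := pv_foldl_flat pvPush (fun orun => pvWin nc.1 K orun.1 orun.2)
    (pvRuns nc.2.toList 0) d
  rw [pvEA_eq_flat nc.1 K nc.2.toList.length nc.2.toList (le_refl _) 0] at hflat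
  exact hflat
theorem pv_step_eq (K : Nat) (d : PySem.Dict String (List (String × Int))) (nc : String × String) :
    pvStepA ((K : Nat) : Int) d nc = pvStepB ((K : Nat) : Int) d nc := by
  rw [pvStepA_eq, pvRawA_eq, pvStepB_eq]

theorem pv_insert_ne_nil (d : PySem.Dict String (List (String × Int))) (key : String)
    (v : List (String × Int)) : (d.insert key v).items ≠ [] := by
  rw [PySem.Dict.insert]
  split_ifs with h
  · intro hmap
    have hnil : d.items = [] := by simpa using hmap
    rw [PySem.Dict.contains, hnil] at h
    simp at h
  · simp

theorem pvPush_ne_nil (d : PySem.Dict String (List (String × Int))) (e : String × (String × Int)) :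
    (pvPush d e).items ≠ [] :=
  pv_insert_ne_nil d e.1 _

theorem pv_foldl_push_mono : ∀ (l : List (String × (String × Int)))
    (d : PySem.Dict String (List (String × Int))), d.items ≠ [] → (l.foldl pvPush d).items ≠ [] := by
  intro l
  induction l with
  | nil => intro d h; exact h
  | cons e t ih => intro d _; exact ih _ (pvPush_ne_nil d e)

theorem pv_foldl_push_ne_nil (l : List (String × (String × Int)))
    (d : PySem.Dict String (List (String × Int))) (h : l ≠ []) :
    (l.foldl pvPush d).items ≠ [] := by
  rcases l with _ | ⟨e, t⟩
  · exact absurd rfl h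
  · rw [List.foldl_cons]
    exact pv_foldl_push_mono t _ (pvPush_ne_nil d e)

theorem pv_stepA_preserve (k : Int) (d : PySem.Dict String (List (String × Int)))
    (nc : String × String) (h : d.items ≠ []) : (pvStepA k d nc).items ≠ [] := by
  rw [pvStepA_eq]
  exact pv_foldl_push_mono _ _ h

theorem pv_outer_mono (k : Int) : ∀ (l : List (String × String))
    (d : PySem.Dict String (List (String × Int))), d.items ≠ [] →
    (l.foldl (pvStepA k) d).items ≠ [] := by
  intro l
  induction l with
  | nil => intro d h; exact h
  | cons nc t ih => intro d h; exact ih _ (pv_stepA_preserve k d nc h)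

theorem pv_rawA_ne_nil {k : Int} (hk : k < 0) (nc : String × String) : pvRawA k nc ≠ [] := by
  unfold pvRawA
  intro hnil
  rw [List.filterMap_eq_nil_iff] at hnil
  have hlen : (0 : Int) ≤ PySem.Str.len nc.2 := Int.natCast_nonneg _
  have hmem : (-k) ∈ PySem.List.pyRange 0 (PySem.Str.len nc.2 - k + 1) 1 := by
    rw [PySem.List.mem_pyRange_one]
    omega
  have hf := hnil _ hmem
  have hslice : PySem.Str.slice nc.2 (some (-k)) (some (-k + k)) = String.ofList [] := by
    rw [show -k + k = (0 : Int) from by ring, PySem.Str.slice]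
    congr 1
    rw [PySem.Chars.slice_eq_listSlice]
    rw [PySem.List.slice_toNat]
    case ha => omega
    case hb => omega
    simp
  rw [hslice] at hf
  simp only [pv_isIn_ofList] at hf
  exact (by simp : 'N' ∉ ([] : List Char)) ((pv_isIn_chars []).mp (by simpa using hf))

-- ===== VERDICT (by name: the statement is the Claim_ definition above) =====
theorem build_kmer_index_for_size_spec : Claim_unchanged_build_kmer_index_for_size := by
  intro contigs k _ hnd
  by_cases hk : k < 0
  · have hc : contigs = [] := by
      by_contra hne
      exact hnd ⟨hk, hne⟩
    subst hc
    rw [portA_eq]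
    unfold build_kmer_index_for_size_alt
    rw [if_pos hk]
    rfl
  · have hK : ((k.toNat : Nat) : Int) = k := Int.toNat_of_nonneg (not_lt.mp hk)
    rw [portA_eq, portB_eq _ _ hk, ← hK]
    congr 1
    exact PySem.List.foldl_congr_mem contigs _ _ _
      (fun acc nc _ => pv_step_eq k.toNat acc nc)

theorem build_kmer_index_for_size_changed : Claim_changed_build_kmer_index_for_size := by
  unfold Claim_changed_build_kmer_index_for_size; decide

theorem build_kmer_index_for_size_tight : Claim_exact_build_kmer_index_for_size := by
  intro contigs k _ hD
  have hD' : k < 0 ∧ contigs ≠ [] := hD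
  obtain ⟨hk, hne⟩ := hD'
  rcases contigs with _ | ⟨c, rest⟩
  · exact absurd rfl hne
  intro heq
  unfold build_kmer_index_for_size_alt at heq
  rw [if_pos hk, portA_eq] at heq
  rw [List.foldl_cons] at heq
  exact pv_outer_mono k rest _ (by
    rw [pvStepA_eq]
    exact pv_foldl_push_ne_nil _ _ (pv_rawA_ne_nil hk c)) heq
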